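-- pv_equiv track=rewrite | github.com/Darmo117/Codewars | Completed/Pair Zeros/solution.py | pair_zeros
-- ===== SOURCE A (Python) =====
-- def pair_zeros(arr: list[int]) -> list[int]:
--     out = []
--     pairing = False
--     for i in arr:
--         if i == 0:
--             if pairing:
--                 pairing = False
--                 continue
--             pairing = True
--         out.append(i)
--     return out
-- ===== SOURCE B (Python) =====
-- def pair_zeros(arr: list[int]) -> list[int]:
--     zeros = [i for i, v in enumerate(arr) if v == 0]
--     drop = {z for k, z in enumerate(zeros) if k % 2 == 1}
--     return [v for i, v in enumerate(arr) if i not in drop]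
-- ===== Notes on version B (the rewrite author's own statement) =====
-- stated objective: alternative
-- what changed: Replaces the streaming boolean-toggle loop by a two-pass index-table decomposition: collect the indices of zeros, drop every second such index, then filter the list by index.
import Mathlib
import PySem

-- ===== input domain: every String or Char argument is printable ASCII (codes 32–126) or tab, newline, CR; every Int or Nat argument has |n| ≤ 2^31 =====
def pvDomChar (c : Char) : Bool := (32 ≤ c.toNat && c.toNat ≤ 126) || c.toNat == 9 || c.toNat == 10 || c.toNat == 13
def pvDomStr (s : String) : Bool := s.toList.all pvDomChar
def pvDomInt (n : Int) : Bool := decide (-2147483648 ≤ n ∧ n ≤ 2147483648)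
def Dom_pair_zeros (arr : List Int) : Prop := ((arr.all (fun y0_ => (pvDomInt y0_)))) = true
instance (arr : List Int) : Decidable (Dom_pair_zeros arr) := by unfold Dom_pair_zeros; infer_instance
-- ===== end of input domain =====

-- B replaces A's streaming boolean-toggle loop by a two-pass index-table decomposition
-- (collect zero indices, drop every second one, filter by index); same O(n) cost, alternative structure.

-- ===== PORT A =====
def pair_zeros (arr : List Int) : List Int :=
  (arr.foldl (fun (st : List Int × Bool) i =>
      if i = 0 then
        if st.2 then (st.1, false)
        else (st.1 ++ [i], true)
      else (st.1 ++ [i], st.2)) ([], false)).1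

-- ===== PORT B =====
def pair_zeros_alt (arr : List Int) : List Int :=
  let zeros := ((PySem.List.enumerate arr 0).filter (fun p => p.2 == 0)).map (fun p => p.1)
  let drop := PySem.Set.ofList
    (((PySem.List.enumerate zeros 0).filter (fun p => PySem.Int.mod p.1 2 == 1)).map (fun p => p.2))
  ((PySem.List.enumerate arr 0).filter (fun p => !(PySem.Set.contains drop p.1))).map (fun p => p.2)

-- ===== PRECONDITION & SPEC =====
def Spec_pair_zeros (arr : List Int) (out : List Int) : Prop := out = pair_zeros_alt arr
instance (arr : List Int) (out : List Int) : Decidable (Spec_pair_zeros arr out) := by unfold Spec_pair_zeros; infer_instance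

-- ===== CLAIM (what is proved, stated in full; the proofs are below) =====
def Claim_equal_pair_zeros : Prop := ∀ (arr : List Int), Dom_pair_zeros arr → Spec_pair_zeros arr (pair_zeros arr)

-- ===== LEMMAS AND PROOFS =====

/-- The common recursive description: pair_zeros with pairing flag `b`. -/
def goPZ : List Int → Bool → List Int
  | [], _ => []
  | x :: xs, b =>
    if x = 0 then (if b then goPZ xs false else x :: goPZ xs true)
    else x :: goPZ xs b

/-- `sel true l` = elements at even positions, `sel false l` = elements at odd positions. -/
def sel : Bool → List Int → List Int
  | _, [] => []
  | true, x :: t => x :: sel false t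
  | false, _ :: t => sel true t

/-- Indices of zeros of `xs`, counting from `s`. -/
def zl (s : Int) (xs : List Int) : List Int :=
  ((PySem.List.enumerate xs s).filter (fun p => p.2 == 0)).map (fun p => p.1)

theorem zl_nil (s : Int) : zl s [] = [] := rfl

theorem zl_cons (s : Int) (x : Int) (xs : List Int) :
    zl s (x :: xs) = if x = 0 then s :: zl (s+1) xs else zl (s+1) xs := by
  by_cases hx : x = 0 <;>
    simp [zl, PySem.List.enumerate_cons, hx]

theorem mem_zl_ge (j s : Int) (xs : List Int) (h : j ∈ zl s xs) : s ≤ j := by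
  induction xs generalizing s with
  | nil => simp [zl_nil] at h
  | cons x xs ih =>
    rw [zl_cons] at h
    split at h
    · rcases List.mem_cons.mp h with h1 | h2
      · omega
      · have := ih (s+1) h2; omega
    · have := ih (s+1) h; omega

theorem mem_sel (j : Int) (b : Bool) (l : List Int) (h : j ∈ sel b l) : j ∈ l := by
  induction l generalizing b with
  | nil => cases b <;> simp [sel] at h
  | cons x t ih =>
    cases b with
    | true =>
      rcases List.mem_cons.mp h with h1 | h2
      · simp [h1]
      · exact List.mem_cons_of_mem _ (ih false h2)
    | false => exact List.mem_cons_of_mem _ (ih true h)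

/-- A's fold from an arbitrary state. -/
theorem foldA_eq (xs : List Int) (out : List Int) (b : Bool) :
    (xs.foldl (fun (st : List Int × Bool) i =>
      if i = 0 then
        if st.2 then (st.1, false)
        else (st.1 ++ [i], true)
      else (st.1 ++ [i], st.2)) (out, b)).1 = out ++ goPZ xs b := by
  induction xs generalizing out b with
  | nil => simp [goPZ]
  | cons x xs ih =>
    by_cases hx : x = 0
    · cases b <;> simp [goPZ, hx, ih, List.append_assoc]
    · simp [goPZ, hx, ih, List.append_assoc]

theorem pair_zeros_eq_go (arr : List Int) : pair_zeros arr = goPZ arr false := by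
  simpa using foldA_eq arr [] false

/-- B's parity filter over `enumerate` computes `sel`: kept are the odd absolute positions. -/
theorem parity_filter_eq_sel (l : List Int) (s : Int) :
    ((PySem.List.enumerate l s).filter (fun p => PySem.Int.mod p.1 2 == 1)).map (fun p => p.2)
      = sel (decide (PySem.Int.mod s 2 = 1)) l := by
  induction l generalizing s with
  | nil => simp [PySem.List.enumerate_nil, sel]
  | cons x t ih =>
    have hs : PySem.Int.mod s 2 = s % 2 := PySem.Int.mod_eq_emod_of_pos (by omega)
    have hs1 : PySem.Int.mod (s+1) 2 = (s+1) % 2 := PySem.Int.mod_eq_emod_of_pos (by omega)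
    rw [PySem.List.enumerate_cons]
    by_cases h : s % 2 = 1
    · have h2 : ((fun (p : Int × Int) => PySem.Int.mod p.1 2 == 1) (s, x)) = true := by
        simp [h]
      have h1 : decide (PySem.Int.mod (s+1) 2 = 1) = false := by
        rw [hs1]; simp; omega
      simp only [List.filter_cons, h2, if_true, List.map_cons]
      rw [ih (s+1), h1, hs]
      simp [h, sel]
    · have h2 : ((fun (p : Int × Int) => PySem.Int.mod p.1 2 == 1) (s, x)) = false := by
        simp [h]
      have h1 : decide (PySem.Int.mod (s+1) 2 = 1) = true := by
        rw [hs1]; simp; omega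
      simp only [List.filter_cons, h2, Bool.false_eq_true, if_false]
      rw [ih (s+1), h1, hs]
      simp [h, sel]

/-- The main invariant: filtering `enumerate xs s` by a membership test that, on indices ≥ s,
agrees with membership in `sel b (zl s xs)`, produces `goPZ xs b`. -/
theorem filter_drop_eq_go (xs : List Int) (s : Int) (b : Bool) (m : Int → Bool)
    (hm : ∀ j, s ≤ j → (m j = true ↔ j ∈ sel b (zl s xs))) :
    ((PySem.List.enumerate xs s).filter (fun p => !(m p.1))).map (fun p => p.2) = goPZ xs b := by
  induction xs generalizing s b with
  | nil => simp [PySem.List.enumerate_nil, goPZ]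
  | cons x xs ih =>
    by_cases hx : x = 0
    · rw [zl_cons, if_pos hx] at hm
      cases b with
      | false =>
        -- sel false (s :: zs) = sel true zs ; index s not in it (all elements ≥ s+1)
        have hms : m s = false := by
          by_contra hc
          have : m s = true := by revert hc; cases m s <;> simp
          have hmem := (hm s le_rfl).mp this
          
          have := mem_zl_ge s (s+1) xs (mem_sel _ _ _ hmem)
          omega
        have hrec : ((PySem.List.enumerate xs (s+1)).filter (fun p => !(m p.1))).map (fun p => p.2)
            = goPZ xs true := by
          apply ih (s+1) true
          intro j hj
          have := hm j (by omega)
          simpa [sel] using this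
        simp [PySem.List.enumerate_cons, hms, goPZ, hx, hrec]
      | true =>
        -- sel true (s :: zs) = s :: sel false zs ; index s IS in it
        have hms : m s = true := by
          rw [hm s le_rfl]; simp [sel]
        have hrec : ((PySem.List.enumerate xs (s+1)).filter (fun p => !(m p.1))).map (fun p => p.2)
            = goPZ xs false := by
          apply ih (s+1) false
          intro j hj
          rw [hm j (by omega)]
          have hsel : sel true (s :: zl (s+1) xs) = s :: sel false (zl (s+1) xs) := rfl
          rw [hsel, List.mem_cons]
          constructor
          · rintro (h1 | h2)
            · omega
            · exact h2
          · exact fun h => Or.inr h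
        simp [PySem.List.enumerate_cons, hms, goPZ, hx, hrec]
    · rw [zl_cons, if_neg hx] at hm
      have hms : m s = false := by
        by_contra hc
        have : m s = true := by revert hc; cases m s <;> simp
        have hmem := (hm s le_rfl).mp this
        have := mem_zl_ge s (s+1) xs (mem_sel _ _ _ hmem)
        omega
      have hrec : ((PySem.List.enumerate xs (s+1)).filter (fun p => !(m p.1))).map (fun p => p.2)
          = goPZ xs b := by
        apply ih (s+1) b
        intro j hj
        exact hm j (by omega)
      simp [PySem.List.enumerate_cons, hms, goPZ, hx, hrec]

theorem pair_zeros_alt_eq_go (arr : List Int) : pair_zeros_alt arr = goPZ arr false := by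
  unfold pair_zeros_alt
  have hdrop : (((PySem.List.enumerate
        (((PySem.List.enumerate arr 0).filter (fun p => p.2 == 0)).map (fun p => p.1)) 0).filter
          (fun p => PySem.Int.mod p.1 2 == 1)).map (fun p => p.2)) = sel false (zl 0 arr) := by
    have := parity_filter_eq_sel (zl 0 arr) 0
    simpa [zl] using this
  simp only [zl] at hdrop ⊢
  rw [hdrop]
  apply filter_drop_eq_go arr 0 false
  intro j _
  rw [PySem.Set.contains_iff, PySem.Set.mem_ofList]
  simp [zl]

-- ===== VERDICT (by name: the statement is the Claim_ definition above) =====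
theorem pair_zeros_spec : Claim_equal_pair_zeros := by
  intro arr _
  unfold Spec_pair_zeros
  rw [pair_zeros_eq_go, pair_zeros_alt_eq_go]
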